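-- pv_equiv track=rewrite | github.com/Knightery/ModelEval | test_skill_accuracy.py | find_safe_split_point
-- ===== SOURCE A (Python) =====
-- def find_safe_split_point(text: str, target_pos: int, window_size: int) -> int:
--     """Find a safe split point that doesn't break words or sentences"""
--     if target_pos >= len(text):
--         return len(text)
--
--     # Look for sentence boundaries first (period, exclamation, question mark)
--     search_start = max(0, target_pos - 50)  # Look back up to 50 chars
--     search_end = min(len(text), target_pos + 50)  # Look forward up to 50 chars
--
--     # Find sentence endings in the search area
--     for i in range(target_pos, search_end):
--         if i < len(text) and text[i] in '.!?':
--             # Check if there's whitespace after the punctuation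
--             if i + 1 < len(text) and text[i + 1].isspace():
--                 return i + 1
--
--     # If no sentence boundary found, look for word boundaries
--     for i in range(target_pos, search_end):
--         if i < len(text) and text[i].isspace():
--             return i
--
--     # If no word boundary found, look backwards
--     for i in range(target_pos, search_start, -1):
--         if i > 0 and text[i].isspace():
--             return i
--
--     # Last resort: use target position
--     return target_pos
-- ===== SOURCE B (Python) =====
-- def find_safe_split_point(text: str, target_pos: int, window_size: int) -> int:
--     n = len(text)
--     if target_pos >= n:
--         return n
--     lo = max(0, target_pos - 50)
--     hi = min(n, target_pos + 50)
--     # single forward while-loop: a sentence boundary anywhere in the window wins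
--     # over an earlier space; the first space is remembered as fallback
--     first_space = None
--     i = target_pos
--     while i < hi:
--         c = text[i]
--         if c in '.!?' and i + 1 < n and text[i + 1].isspace():
--             return i + 1
--         if first_space is None and c.isspace():
--             first_space = i
--         i += 1
--     if first_space is not None:
--         return first_space
--     # backward while-loop fallback
--     j = target_pos
--     while j > lo:
--         if j > 0 and text[j].isspace():
--             return j
--         j -= 1
--     return target_pos
-- ===== Notes on version B (the rewrite author's own statement) =====
-- stated objective: alternative
-- what changed: A's two sequential forward range-scans over the window are replaced by one forward while-loop over an index that remembers the first space while giving any later sentence boundary priority, plus a backward while-loop fallback; no range objects are built.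
import Mathlib
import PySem

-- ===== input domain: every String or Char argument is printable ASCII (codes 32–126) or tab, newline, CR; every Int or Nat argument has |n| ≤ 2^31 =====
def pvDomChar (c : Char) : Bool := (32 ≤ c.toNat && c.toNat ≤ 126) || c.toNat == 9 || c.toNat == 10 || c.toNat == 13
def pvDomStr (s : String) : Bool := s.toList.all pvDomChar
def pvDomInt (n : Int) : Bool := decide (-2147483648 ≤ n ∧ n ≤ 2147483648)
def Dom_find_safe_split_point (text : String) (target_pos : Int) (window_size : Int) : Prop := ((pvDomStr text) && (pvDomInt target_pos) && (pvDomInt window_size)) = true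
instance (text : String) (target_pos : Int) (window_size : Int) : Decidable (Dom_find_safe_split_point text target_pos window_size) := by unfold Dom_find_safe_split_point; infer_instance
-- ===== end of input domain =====

-- B replaces A's two sequential forward range-scans with one forward while-loop over an
-- index that remembers the first space while a later sentence boundary keeps priority,
-- plus a backward while-loop fallback; same return value everywhere A returns.

-- ===== PORT A =====
-- text[i] in '.!?'
def pvPunct (c : Char) : Bool := c == '.' || c == '!' || c == '?'

-- loop-body condition of A's first loop: i < len(text) and text[i] in '.!?'
-- and i+1 < len(text) and text[i+1].isspace()   (indexing via pyGetD; Pre_ keeps indices in range)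
def pvA_sent (cs : List Char) (n i : Int) : Bool :=
  decide (i < n) && pvPunct (PySem.List.pyGetD cs i 'x') &&
    (decide (i + 1 < n) && PySem.Chars.isspace (PySem.List.pyGetD cs (i + 1) 'x'))

-- condition of A's second loop: i < len(text) and text[i].isspace()
def pvA_space (cs : List Char) (n i : Int) : Bool :=
  decide (i < n) && PySem.Chars.isspace (PySem.List.pyGetD cs i 'x')

-- condition of A's backward loop: i > 0 and text[i].isspace()
def pvA_back (cs : List Char) (i : Int) : Bool :=
  decide (0 < i) && PySem.Chars.isspace (PySem.List.pyGetD cs i 'x')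

def find_safe_split_point (text : String) (target_pos : Int) (window_size : Int) : Int :=
  let cs := text.toList
  let n : Int := PySem.List.len cs
  if target_pos ≥ n then n
  else
    let search_start := max 0 (target_pos - 50)
    let search_end := min n (target_pos + 50)
    match List.find? (pvA_sent cs n) (PySem.List.pyRange target_pos search_end 1) with
    | some i => i + 1
    | none =>
      match List.find? (pvA_space cs n) (PySem.List.pyRange target_pos search_end 1) with
      | some i => i
      | none =>
        match List.find? (pvA_back cs) (PySem.List.pyRange target_pos search_start (-1)) with
        | some i => i
        | none => target_pos

-- ===== PORT B =====
-- B's forward while-loop: 'while i < hi', early return some(i+1) on a sentence boundary,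
-- first-space accumulator fs; after the loop the accumulator is the answer (or none).
def pvFwd (cs : List Char) (n hi : Int) (i : Int) (fs : Option Int) : Option Int :=
  if h : i < hi then
    let c := PySem.List.pyGetD cs i 'x'
    if (c == '.' || c == '!' || c == '?') &&
        (decide (i + 1 < n) && PySem.Chars.isspace (PySem.List.pyGetD cs (i + 1) 'x')) then
      some (i + 1)
    else
      pvFwd cs n hi (i + 1) (if fs.isNone && PySem.Chars.isspace c then some i else fs)
  else fs
termination_by (hi - i).toNat
decreasing_by omega

-- B's backward while-loop: 'while j > lo', return j on 'j > 0 and text[j].isspace()'.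
def pvBwd (cs : List Char) (lo : Int) (j : Int) : Option Int :=
  if h : lo < j then
    if decide (0 < j) && PySem.Chars.isspace (PySem.List.pyGetD cs j 'x') then some j
    else pvBwd cs lo (j - 1)
  else none
termination_by (j - lo).toNat
decreasing_by omega

def find_safe_split_point_alt (text : String) (target_pos : Int) (window_size : Int) : Int :=
  let cs := text.toList
  let n : Int := PySem.List.len cs
  if target_pos ≥ n then n
  else
    let lo := max 0 (target_pos - 50)
    let hi := min n (target_pos + 50)
    match pvFwd cs n hi target_pos none with
    | some p => p
    | none =>
      match pvBwd cs lo target_pos with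
      | some j => j
      | none => target_pos

-- ===== PRECONDITION & SPEC =====
-- Pre_ excludes exactly the inputs where the Python raises IndexError:
-- target_pos < -len(text), where text[target_pos] is the first access of the forward scan.
def Pre_find_safe_split_point (text : String) (target_pos : Int) (window_size : Int) : Prop :=
  -(PySem.List.len text.toList) ≤ target_pos
instance (text : String) (target_pos : Int) (window_size : Int) : Decidable (Pre_find_safe_split_point text target_pos window_size) := by unfold Pre_find_safe_split_point; infer_instance

def pvWitness_find_safe_split_point : String × Int × Int := ("a. b cd", 4, 0)

def Spec_find_safe_split_point (text : String) (target_pos : Int) (window_size : Int) (out : Int) : Prop := out = find_safe_split_point_alt text target_pos window_size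
instance (text : String) (target_pos : Int) (window_size : Int) (out : Int) : Decidable (Spec_find_safe_split_point text target_pos window_size out) := by unfold Spec_find_safe_split_point; infer_instance

-- ===== CLAIM (what is proved, stated in full; the proofs are below) =====
def Claim_equal_find_safe_split_point : Prop := ∀ (text : String) (target_pos : Int) (window_size : Int), Dom_find_safe_split_point text target_pos window_size → Pre_find_safe_split_point text target_pos window_size → Spec_find_safe_split_point text target_pos window_size (find_safe_split_point text target_pos window_size)

-- ===== LEMMAS AND PROOFS =====

-- when hi ≤ len cs, A's first-loop condition at i < hi equals B's inline sentence test
theorem pvA_sent_eq (cs : List Char) (n i : Int) (hi : i < n) :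
    pvA_sent cs n i =
      ((PySem.List.pyGetD cs i 'x' == '.' || PySem.List.pyGetD cs i 'x' == '!' ||
        PySem.List.pyGetD cs i 'x' == '?') &&
       (decide (i + 1 < n) && PySem.Chars.isspace (PySem.List.pyGetD cs (i + 1) 'x'))) := by
  simp [pvA_sent, pvPunct, hi]

-- B's forward loop computes A's two staged find?s over the same window
theorem pvFwd_spec (cs : List Char) (n hi : Int) (i : Int) (fs : Option Int)
    (hn : hi ≤ n) :
    pvFwd cs n hi i fs =
      match List.find? (pvA_sent cs n) (PySem.List.pyRange i hi 1) with
      | some k => some (k + 1)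
      | none => fs.or (List.find? (fun k => PySem.Chars.isspace (PySem.List.pyGetD cs k 'x'))
                        (PySem.List.pyRange i hi 1)) := by
  by_cases h : i < hi
  · rw [PySem.List.pyRange_one_cons h]
    rw [pvFwd, dif_pos h]
    dsimp only
    have hs := pvA_sent_eq cs n i (lt_of_lt_of_le h hn)
    rw [← hs]
    by_cases hc : pvA_sent cs n i = true
    · simp [List.find?, hc]
    · rw [if_neg (by simpa using hc)]
      rw [pvFwd_spec cs n hi (i + 1) _ hn]
      simp only [List.find?, hc]
      by_cases hw : PySem.Chars.isspace (PySem.List.pyGetD cs i 'x') = true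
      · cases fs <;> simp [hw, Option.or]
      · cases fs <;> simp [hw, Option.or]
  · rw [PySem.List.pyRange_one_eq_nil (by omega)]
    rw [pvFwd, dif_neg h]
    cases fs <;> simp [Option.or]
termination_by (hi - i).toNat
decreasing_by omega

-- A's second find? over the window equals the bare-isspace find? (i < n holds on the window)
theorem pvA_space_find (cs : List Char) (n hi : Int) (i : Int) (hn : hi ≤ n) :
    List.find? (pvA_space cs n) (PySem.List.pyRange i hi 1) =
      List.find? (fun k => PySem.Chars.isspace (PySem.List.pyGetD cs k 'x'))
        (PySem.List.pyRange i hi 1) := by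
  by_cases h : i < hi
  · rw [PySem.List.pyRange_one_cons h]
    have hk : i < n := lt_of_lt_of_le h hn
    by_cases hw : PySem.Chars.isspace (PySem.List.pyGetD cs i 'x') = true
    · simp [List.find?, pvA_space, hk, hw]
    · simp only [List.find?, pvA_space]
      simp [hk, hw]
      exact pvA_space_find cs n hi (i + 1) hn
  · rw [PySem.List.pyRange_one_eq_nil (by omega)]
    rfl
termination_by (hi - i).toNat
decreasing_by omega

-- B's backward loop computes A's backward find?
theorem pvBwd_spec (cs : List Char) (lo : Int) (j : Int) :
    pvBwd cs lo j = List.find? (pvA_back cs) (PySem.List.pyRange j lo (-1)) := by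
  by_cases h : lo < j
  · rw [PySem.List.pyRange_neg_one_cons h]
    rw [pvBwd, dif_pos h]
    by_cases hc : pvA_back cs j = true
    · simp only [List.find?, hc]
      rw [if_pos (by simpa [pvA_back] using hc)]
    · rw [if_neg (by simpa [pvA_back] using hc), List.find?]
      simp only [hc]
      exact pvBwd_spec cs lo (j - 1)
  · rw [PySem.List.pyRange_neg_one_eq_nil (by omega)]
    rw [pvBwd, dif_neg h]
    simp
termination_by (j - lo).toNat
decreasing_by omega

-- ===== VERDICT (by name: the statement is the Claim_ definition above) =====
theorem find_safe_split_point_spec : Claim_equal_find_safe_split_point := by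
  intro text target_pos window_size _ _
  unfold Spec_find_safe_split_point find_safe_split_point find_safe_split_point_alt
  dsimp only
  by_cases h : target_pos ≥ PySem.List.len text.toList
  · rw [if_pos h, if_pos h]
  · rw [if_neg h, if_neg h]
    rw [pvFwd_spec text.toList (PySem.List.len text.toList)
        (min (PySem.List.len text.toList) (target_pos + 50)) target_pos none (min_le_left _ _)]
    rw [pvBwd_spec, ← pvA_space_find text.toList (PySem.List.len text.toList)
        (min (PySem.List.len text.toList) (target_pos + 50)) target_pos (min_le_left _ _)]
    cases List.find? (pvA_sent text.toList (PySem.List.len text.toList))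
        (PySem.List.pyRange target_pos (min (PySem.List.len text.toList) (target_pos + 50)) 1) with
    | some i => rfl
    | none => simp only [Option.or]
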